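-- pv_equiv track=rewrite | github.com/McGregor-H/music-intervals | utils.py | pitch_list_generator
-- ===== SOURCE A (Python) =====
-- def pitch_list_generator(initial_pitch, perm_list, entered_values):
--     pitches = ['C', 'C#', 'D', 'D#', 'E', 'F', 'F#', 'G', 'G#', 'A', 'A#', 'B']
--     pitches_list_all = []
--     for bit in perm_list:
--         pitches_list = []  # reset the pitches_list for each permutation
--         #start_pitch = initial_pitch
--         for i in range(len(entered_values)):
--             interval = entered_values[i]
--             direction = bit[i]  # change here to use bit instead of perm_list
--             if direction == 0:
--                 initial_pitch_index = pitches.index(initial_pitch)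
--                 new_pitch_index = (initial_pitch_index + interval) % len(pitches)
--                 new_pitch = pitches[new_pitch_index]
--                 pitches_list.append(new_pitch)
--                 initial_pitch = new_pitch
--             else:
--                 initial_pitch_index = pitches.index(initial_pitch)
--                 new_pitch_index = (initial_pitch_index - interval) % len(pitches)
--                 new_pitch = pitches[new_pitch_index]
--                 pitches_list.append(new_pitch)
--                 initial_pitch = new_pitch
--         pitches_list_all.append(pitches_list)
--
--     #pitches_list_all.insert(0, start_pitch)
--     return pitches_list_all
-- ===== SOURCE B (Python) =====
-- def pitch_list_generator(initial_pitch, perm_list, entered_values):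
--     pitches = ['C', 'C#', 'D', 'D#', 'E', 'F', 'F#', 'G', 'G#', 'A', 'A#', 'B']
--     # Flatten all (direction, interval) pairs into one list of signed deltas.
--     deltas = [iv if d == 0 else -iv
--               for bit in perm_list
--               for d, iv in zip(bit, entered_values)]
--     names = []
--     if deltas:
--         idx = pitches.index(initial_pitch)
--         for delta in deltas:
--             idx = (idx + delta) % 12
--             names.append(pitches[idx])
--     n = len(entered_values)
--     return [names[k * n:(k + 1) * n] for k in range(len(perm_list))]
-- ===== Notes on version B (the rewrite author's own statement) =====
-- stated objective: alternative
-- what changed: B flattens all (direction, interval) pairs into one list of signed deltas, runs a single accumulate-style pass over a running integer index (one pitches.index lookup total, mod 12 each step) and then chunks the flat name list back into per-permutation sublists by slicing, instead of A's nested loops that re-scan pitches.index on the current pitch name at every step.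
import Mathlib
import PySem

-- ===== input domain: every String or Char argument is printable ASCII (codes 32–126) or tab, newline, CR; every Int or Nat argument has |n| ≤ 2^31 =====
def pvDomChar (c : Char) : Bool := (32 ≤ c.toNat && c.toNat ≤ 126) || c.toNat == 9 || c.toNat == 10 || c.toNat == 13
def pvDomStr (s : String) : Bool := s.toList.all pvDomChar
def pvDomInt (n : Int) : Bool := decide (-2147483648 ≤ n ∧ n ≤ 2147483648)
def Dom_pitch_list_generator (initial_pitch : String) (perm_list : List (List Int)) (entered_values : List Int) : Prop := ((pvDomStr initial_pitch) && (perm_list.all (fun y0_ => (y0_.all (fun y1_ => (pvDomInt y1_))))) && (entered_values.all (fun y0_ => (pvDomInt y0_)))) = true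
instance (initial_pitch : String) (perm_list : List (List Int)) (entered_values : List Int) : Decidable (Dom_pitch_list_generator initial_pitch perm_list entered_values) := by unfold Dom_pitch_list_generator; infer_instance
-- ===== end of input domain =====

-- B flattens all (direction, interval) pairs into one list of signed deltas, runs a single
-- accumulate-style pass over a running integer index (one .index lookup total) and chunks the
-- flat name list back into per-permutation sublists by slicing (objective: alternative).

-- ===== PORT A =====
-- the shared literal list `pitches` both Pythons define
def pvPitches : List String := ["C", "C#", "D", "D#", "E", "F", "F#", "G", "G#", "A", "A#", "B"]

-- body of A's inner `for i in range(len(entered_values))` loop; the raising sites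
-- (pitches.index → ValueError, bit[i]/entered_values[i] → IndexError) are total here via
-- .getD / pyGetD defaults — Pre_ excludes exactly the inputs where Python raises
def pvInnerBodyA (bit ev : List Int) (st2 : String × List String) (i : Int) : String × List String :=
  let interval := PySem.List.pyGetD ev i 0
  let direction := PySem.List.pyGetD bit i 0
  if direction == 0 then
    let initial_pitch_index : Int := ((PySem.List.index? pvPitches st2.1).getD 0 : Nat)
    let new_pitch_index := PySem.Int.mod (initial_pitch_index + interval) (pvPitches.length : Int)
    let new_pitch := PySem.List.pyGetD pvPitches new_pitch_index ""
    (new_pitch, st2.2 ++ [new_pitch])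
  else
    let initial_pitch_index : Int := ((PySem.List.index? pvPitches st2.1).getD 0 : Nat)
    let new_pitch_index := PySem.Int.mod (initial_pitch_index - interval) (pvPitches.length : Int)
    let new_pitch := PySem.List.pyGetD pvPitches new_pitch_index ""
    (new_pitch, st2.2 ++ [new_pitch])

-- body of A's outer `for bit in perm_list` loop; state = (initial_pitch, pitches_list_all)
def pvOuterA (ev : List Int) (st : String × List (List String)) (bit : List Int) : String × List (List String) :=
  let inner := (PySem.List.pyRange 0 (ev.length : Int) 1).foldl (pvInnerBodyA bit ev) (st.1, [])
  (inner.1, st.2 ++ [inner.2])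

def pitch_list_generator (initial_pitch : String) (perm_list : List (List Int)) (entered_values : List Int) : List (List String) :=
  (perm_list.foldl (pvOuterA entered_values) (initial_pitch, [])).2

-- ===== PORT B =====
-- `iv if d == 0 else -iv` for a pair (d, iv) from zip(bit, entered_values)
def pvSigned (p : Int × Int) : Int := if p.1 == 0 then p.2 else -p.2

-- body of B's single `for delta in deltas` pass; state = (idx, names)
def pvBStep (st : Int × List String) (delta : Int) : Int × List String :=
  let idx := PySem.Int.mod (st.1 + delta) 12
  (idx, st.2 ++ [PySem.List.pyGetD pvPitches idx ""])

def pitch_list_generator_alt (initial_pitch : String) (perm_list : List (List Int)) (entered_values : List Int) : List (List String) :=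
  let deltas := perm_list.flatMap (fun bit => (bit.zip entered_values).map pvSigned)
  let names :=
    if deltas = [] then []
    else
      let idx0 : Int := ((PySem.List.index? pvPitches initial_pitch).getD 0 : Nat)
      (deltas.foldl pvBStep (idx0, [])).2
  let n : Int := (entered_values.length : Int)
  (PySem.List.pyRange 0 (perm_list.length : Int) 1).map
    (fun k => PySem.List.slice names (some (k * n)) (some ((k + 1) * n)))

-- ===== PRECONDITION & SPEC =====
-- Pre_ excludes exactly the inputs where A raises: when both lists are non-empty, A looks up
-- pitches.index(initial_pitch) (ValueError if absent) and reads bit[i] for i < len(entered_values)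
-- (IndexError if a bit is shorter); with either list empty A returns without touching them.
def Pre_pitch_list_generator (initial_pitch : String) (perm_list : List (List Int)) (entered_values : List Int) : Prop :=
  perm_list = [] ∨ entered_values = [] ∨
    (initial_pitch ∈ pvPitches ∧ ∀ bit ∈ perm_list, entered_values.length ≤ bit.length)
instance (initial_pitch : String) (perm_list : List (List Int)) (entered_values : List Int) : Decidable (Pre_pitch_list_generator initial_pitch perm_list entered_values) := by unfold Pre_pitch_list_generator; infer_instance

def pvWitness_pitch_list_generator : String × List (List Int) × List Int := ("C", [[0, 1], [1, 0]], [2, 3])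

def Spec_pitch_list_generator (initial_pitch : String) (perm_list : List (List Int)) (entered_values : List Int) (out : List (List String)) : Prop := out = pitch_list_generator_alt initial_pitch perm_list entered_values
instance (initial_pitch : String) (perm_list : List (List Int)) (entered_values : List Int) (out : List (List String)) : Decidable (Spec_pitch_list_generator initial_pitch perm_list entered_values out) := by unfold Spec_pitch_list_generator; infer_instance

-- ===== CLAIM (what is proved, stated in full; the proofs are below) =====
def Claim_equal_pitch_list_generator : Prop := ∀ (initial_pitch : String) (perm_list : List (List Int)) (entered_values : List Int), Dom_pitch_list_generator initial_pitch perm_list entered_values → Pre_pitch_list_generator initial_pitch perm_list entered_values → Spec_pitch_list_generator initial_pitch perm_list entered_values (pitch_list_generator initial_pitch perm_list entered_values)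

-- ===== LEMMAS AND PROOFS =====

-- proof-side vocabulary: a running pitch index, its step, and the names it generates
def pitchAt (j : Int) : String := PySem.List.pyGetD pvPitches j ""
def stepIdx (j d : Int) : Int := PySem.Int.mod (j + d) 12
def runIdx (j : Int) (ds : List Int) : Int := ds.foldl stepIdx j
def runNames : Int → List Int → List String
  | _, [] => []
  | j, d :: rest => pitchAt (stepIdx j d) :: runNames (stepIdx j d) rest
-- the signed deltas one bit contributes (B's form)
def dsOf (ev bit : List Int) : List Int := (bit.zip ev).map pvSigned
-- the per-permutation rows from index j
def rows (ev : List Int) : Int → List (List Int) → List (List String)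
  | _, [] => []
  | j, bit :: rest => runNames j (dsOf ev bit) :: rows ev (runIdx j (dsOf ev bit)) rest

-- A's zip-form inner body: the same computation reading the pair (interval, direction) directly
def pvZBody (st2 : String × List String) (p : Int × Int) : String × List String :=
  if p.2 == 0 then
    let ipi : Int := ((PySem.List.index? pvPitches st2.1).getD 0 : Nat)
    let np := PySem.List.pyGetD pvPitches (PySem.Int.mod (ipi + p.1) 12) ""
    (np, st2.2 ++ [np])
  else
    let ipi : Int := ((PySem.List.index? pvPitches st2.1).getD 0 : Nat)
    let np := PySem.List.pyGetD pvPitches (PySem.Int.mod (ipi - p.1) 12) ""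
    (np, st2.2 ++ [np])

lemma index_pitchAt (j : Int) (h0 : 0 ≤ j) (h1 : j < 12) :
    (((PySem.List.index? pvPitches (pitchAt j)).getD 0 : Nat) : Int) = j := by
  interval_cases j <;> decide

lemma mem_pvPitches_index (ip : String) (h : ip ∈ pvPitches) :
    pitchAt (((PySem.List.index? pvPitches ip).getD 0 : Nat) : Int) = ip ∧
    (0 : Int) ≤ (((PySem.List.index? pvPitches ip).getD 0 : Nat) : Int) ∧
    (((PySem.List.index? pvPitches ip).getD 0 : Nat) : Int) < 12 := by
  fin_cases h <;> exact ⟨by decide, by decide, by decide⟩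

lemma stepIdx_nonneg (j d : Int) : 0 ≤ stepIdx j d := PySem.Int.mod_nonneg _ (by norm_num)
lemma stepIdx_lt (j d : Int) : stepIdx j d < 12 := PySem.Int.mod_lt _ (by norm_num)

lemma runIdx_bounds (ds : List Int) : ∀ j : Int, 0 ≤ j → j < 12 →
    0 ≤ runIdx j ds ∧ runIdx j ds < 12 := by
  induction ds with
  | nil => intro j h0 h1; exact ⟨h0, h1⟩
  | cons d rest ih =>
    intro j h0 h1
    exact ih (stepIdx j d) (stepIdx_nonneg j d) (stepIdx_lt j d)

lemma runIdx_cons (j d : Int) (ds : List Int) : runIdx j (d :: ds) = runIdx (stepIdx j d) ds := rfl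

lemma runNames_append (ds1 : List Int) : ∀ (j : Int) (ds2 : List Int),
    runNames j (ds1 ++ ds2) = runNames j ds1 ++ runNames (runIdx j ds1) ds2 := by
  induction ds1 with
  | nil => intro j ds2; simp [runNames, runIdx]
  | cons d rest ih => intro j ds2; simp [runNames, ih, runIdx_cons]

lemma length_runNames (ds : List Int) : ∀ j : Int, (runNames j ds).length = ds.length := by
  induction ds with
  | nil => intro j; rfl
  | cons d rest ih => intro j; simp [runNames, ih]

lemma length_dsOf (ev bit : List Int) (h : ev.length ≤ bit.length) :
    (dsOf ev bit).length = ev.length := by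
  simp [dsOf]; omega

-- A's inner range-loop, rewritten as a fold over the pairs (interval, direction)
lemma innerA_eq_zip (bit ev : List Int) (h : ev.length ≤ bit.length) (st : String × List String) :
    (PySem.List.pyRange 0 (ev.length : Int) 1).foldl (pvInnerBodyA bit ev) st
      = (ev.zip bit).foldl pvZBody st := by
  have hlen : (ev.zip bit).length = ev.length := by simp; omega
  have h2 : ((ev.length : Int)) = ((ev.zip bit).length : Int) := by rw [hlen]
  rw [h2, ← PySem.List.foldl_pyRange_zero_pyGetD' (ev.zip bit) ((0:Int), (0:Int)) pvZBody st]
  apply PySem.List.foldl_congr_mem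
  intro acc i hi
  obtain ⟨h0, h1⟩ := PySem.List.mem_pyRange_one.mp hi
  have h1' : i < ((ev.zip bit).length : Int) := h1
  have hiev : i.toNat < ev.length := by omega
  have hibit : i.toNat < bit.length := by omega
  rw [PySem.List.pyGetD_eq_getElem _ _ h0 h1', List.getElem_zip]
  have hev : PySem.List.pyGetD ev i 0 = ev[i.toNat]'hiev :=
    PySem.List.pyGetD_eq_getElem _ _ h0 (by omega)
  have hbit : PySem.List.pyGetD bit i 0 = bit[i.toNat]'hibit :=
    PySem.List.pyGetD_eq_getElem _ _ h0 (by omega)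
  have hlp : ((pvPitches.length : Nat) : Int) = 12 := by decide
  simp only [pvInnerBodyA, pvZBody, hev, hbit, hlp]

-- the zip fold, started at a pitch name with known index, generates runNames
lemma zipfold_eq (zs : List (Int × Int)) : ∀ (j : Int) (acc : List String), 0 ≤ j → j < 12 →
    zs.foldl pvZBody (pitchAt j, acc)
      = (pitchAt (runIdx j (zs.map (fun p => if p.2 == 0 then p.1 else -p.1))),
         acc ++ runNames j (zs.map (fun p => if p.2 == 0 then p.1 else -p.1))) := by
  induction zs with
  | nil => intro j acc h0 h1; simp [runNames, runIdx]
  | cons p rest ih =>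
    intro j acc h0 h1
    have hidx := index_pitchAt j h0 h1
    by_cases hp : p.2 == 0
    · have hbody : pvZBody (pitchAt j, acc) p
          = (pitchAt (stepIdx j p.1), acc ++ [pitchAt (stepIdx j p.1)]) := by
        simp only [pvZBody, hp, hidx, stepIdx]; simp [pitchAt]
      simp only [List.foldl_cons, hbody,
        ih (stepIdx j p.1) _ (stepIdx_nonneg _ _) (stepIdx_lt _ _),
        List.map_cons, hp, runIdx_cons, runNames]
      simp
    · have hbody : pvZBody (pitchAt j, acc) p
          = (pitchAt (stepIdx j (-p.1)), acc ++ [pitchAt (stepIdx j (-p.1))]) := by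
        simp only [pvZBody, hp, hidx, stepIdx, Int.sub_eq_add_neg]
        simp [pitchAt]
      simp only [List.foldl_cons, hbody,
        ih (stepIdx j (-p.1)) _ (stepIdx_nonneg _ _) (stepIdx_lt _ _),
        List.map_cons, hp, runIdx_cons, runNames]
      simp

-- A's signed delta per pair (interval, direction) is B's per pair (direction, interval)
lemma map_signed_swap (ev : List Int) : ∀ bit : List Int,
    (ev.zip bit).map (fun p => if p.2 == 0 then p.1 else -p.1) = dsOf ev bit := by
  induction ev with
  | nil => intro bit; cases bit <;> simp [dsOf]
  | cons e es ih =>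
    intro bit
    cases bit with
    | nil => simp [dsOf]
    | cons b bs => simp [dsOf, pvSigned] at ih ⊢; exact ih bs

-- B's single pass generates runNames
lemma bfold_eq (ds : List Int) : ∀ (j : Int) (acc : List String),
    ds.foldl pvBStep (j, acc) = (runIdx j ds, acc ++ runNames j ds) := by
  induction ds with
  | nil => intro j acc; simp [runNames, runIdx]
  | cons d rest ih =>
    intro j acc
    have : pvBStep (j, acc) d = (stepIdx j d, acc ++ [pitchAt (stepIdx j d)]) := rfl
    simp only [List.foldl_cons, this, ih, runIdx_cons, runNames]
    simp

-- A's outer loop produces `rows`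
lemma a_main (ev : List Int) : ∀ (pl : List (List Int)) (j : Int) (acc : List (List String)),
    0 ≤ j → j < 12 → (∀ bit ∈ pl, ev.length ≤ bit.length) →
    (pl.foldl (pvOuterA ev) (pitchAt j, acc)).2 = acc ++ rows ev j pl := by
  intro pl
  induction pl with
  | nil => intro j acc _ _ _; simp [rows]
  | cons bit rest ih =>
    intro j acc h0 h1 hb
    have hbit := hb bit (by simp)
    have houter : pvOuterA ev (pitchAt j, acc) bit
        = (pitchAt (runIdx j (dsOf ev bit)), acc ++ [runNames j (dsOf ev bit)]) := by
      simp only [pvOuterA]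
      rw [innerA_eq_zip bit ev hbit, zipfold_eq _ j [] h0 h1, map_signed_swap ev bit]
      simp
    obtain ⟨hr0, hr1⟩ := runIdx_bounds (dsOf ev bit) j h0 h1
    simp only [List.foldl_cons, houter, ih _ _ hr0 hr1 (fun b hbm => hb b (by simp [hbm])), rows]
    simp

-- chunking the flat runNames list recovers `rows`
lemma chunks_eq (ev : List Int) : ∀ (pl : List (List Int)) (j : Int),
    (∀ bit ∈ pl, (dsOf ev bit).length = ev.length) →
    (List.range pl.length).map
        (fun k => ((runNames j (pl.flatMap (fun bit => dsOf ev bit))).drop (k * ev.length)).take ev.length)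
      = rows ev j pl := by
  intro pl
  induction pl with
  | nil => intro j _; simp [rows]
  | cons bit rest ih =>
    intro j hb
    have hlb : (dsOf ev bit).length = ev.length := hb bit (by simp)
    have hsplit : runNames j ((bit :: rest).flatMap (fun b => dsOf ev b))
        = runNames j (dsOf ev bit) ++ runNames (runIdx j (dsOf ev bit)) (rest.flatMap (fun b => dsOf ev b)) := by
      rw [List.flatMap_cons, runNames_append]
    have hrowlen : (runNames j (dsOf ev bit)).length = ev.length := by
      rw [length_runNames, hlb]
    rw [List.length_cons, List.range_succ_eq_map, List.map_cons, List.map_map]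
    congr 1
    · -- head chunk
      rw [hsplit]
      simp only [Nat.zero_mul, List.drop_zero]
      rw [← hrowlen, List.take_left]
    · -- tail chunks
      rw [← ih (runIdx j (dsOf ev bit)) (fun b hbm => hb b (by simp [hbm]))]
      apply List.map_congr_left
      intro k _
      simp only [Function.comp]
      rw [hsplit]
      have : Nat.succ k * ev.length = (runNames j (dsOf ev bit)).length + k * ev.length := by
        rw [hrowlen, Nat.succ_mul, Nat.add_comm]
      rw [this, List.drop_append, List.drop_eq_nil_of_le (by omega), Nat.add_sub_cancel_left]
      simp

lemma a_ev_nil : ∀ (pl : List (List Int)) (st : String × List (List String)),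
    (pl.foldl (pvOuterA []) st).2 = st.2 ++ pl.map (fun _ => []) := by
  intro pl
  induction pl with
  | nil => intro st; simp
  | cons bit rest ih =>
    intro st
    have : pvOuterA [] st bit = (st.1, st.2 ++ [[]]) := by
      rw [pvOuterA]
      simp [PySem.List.pyRange_one_eq_nil (le_refl (0:Int))]
    simp [this, ih]

-- B's result, when there is real work, is `rows` from the initial pitch's index
lemma b_main (ip : String) (pl : List (List Int)) (ev : List Int)
    (hpl : pl ≠ []) (hev : ev ≠ []) (hb : ∀ bit ∈ pl, ev.length ≤ bit.length) :
    pitch_list_generator_alt ip pl ev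
      = rows ev (((PySem.List.index? pvPitches ip).getD 0 : Nat) : Int) pl := by
  rw [pitch_list_generator_alt]
  have hflat : (fun bit => (bit.zip ev).map pvSigned) = fun bit => dsOf ev bit := rfl
  rw [hflat]
  have hne : pl.flatMap (fun bit => dsOf ev bit) ≠ [] := by
    cases pl with
    | nil => exact absurd rfl hpl
    | cons b rest =>
      have hlb : (dsOf ev b).length = ev.length := length_dsOf ev b (hb b (by simp))
      have hlen0 : ev.length ≠ 0 := by simpa [List.length_eq_zero_iff] using hev
      simp only [List.flatMap_cons]
      intro hcon
      have hc := congrArg List.length hcon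
      rw [List.length_append, hlb] at hc
      simp only [List.length_nil] at hc
      omega
  rw [if_neg hne]
  simp only [bfold_eq, List.nil_append]
  have hmap : (PySem.List.pyRange 0 (pl.length : Int) 1) = List.map (fun k : Nat => (k : Int)) (List.range pl.length) :=
    PySem.List.pyRange_zero_natCast pl.length
  rw [hmap, List.map_map]
  rw [← chunks_eq ev pl _ (fun bit hm => by rw [length_dsOf ev bit (hb bit hm)])]
  apply List.map_congr_left
  intro k _
  simp only [Function.comp]
  have h1 : ((k:Int) * (ev.length:Int)) = ((k * ev.length : Nat) : Int) := by push_cast; ring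
  have h2 : (((k:Int) + 1) * (ev.length:Int)) = ((k * ev.length : Nat) : Int) + ((ev.length : Nat) : Int) := by
    push_cast; ring
  rw [h1, h2, PySem.List.slice_natCast_add]

-- ===== VERDICT (by name: the statement is the Claim_ definition above) =====
theorem pitch_list_generator_spec : Claim_equal_pitch_list_generator := by
  intro ip pl ev _ hpre
  unfold Spec_pitch_list_generator
  by_cases hpl : pl = []
  · subst hpl
    simp [pitch_list_generator, pitch_list_generator_alt,
      PySem.List.pyRange_one_eq_nil (le_refl (0:Int))]
  by_cases hev : ev = []
  · subst hev
    rw [pitch_list_generator, a_ev_nil]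
    rw [pitch_list_generator_alt]
    have hz : (fun (bit : List Int) => (bit.zip ([] : List Int)).map pvSigned) = fun _ => ([] : List Int) := by
      funext bit; simp
    rw [hz]
    have hfl : List.flatMap (fun _ => ([] : List Int)) pl = [] := by simp
    rw [hfl]
    have hsl : ∀ a b : Option Int, PySem.List.slice ([] : List String) a b = [] := by
      intro a b; cases a <;> cases b <;> simp [PySem.List.slice]
    simp only [hsl, List.nil_append, if_pos]
    have hlen : (PySem.List.pyRange 0 (pl.length : Int) 1).length = pl.length := by
      rw [PySem.List.length_pyRange_one]; simp
    rw [List.map_const', List.map_const', hlen]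
  rcases hpre with h | h | ⟨hip, hb⟩
  · exact absurd h hpl
  · exact absurd h hev
  obtain ⟨hA, hB0, hB1⟩ := mem_pvPitches_index ip hip
  rw [pitch_list_generator, b_main ip pl ev hpl hev hb]
  conv_lhs => rw [← hA]
  rw [a_main ev pl _ [] hB0 hB1 hb]
  simp
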